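-- pv_equiv track=rewrite | github.com/abhigandesri13/TCS-codevita-season-13 | TCS Round 2/First.py | min_rooms_to_center
-- ===== SOURCE A (Python) =====
-- from collections import deque
--
-- def min_rooms_to_center(lines):
--     N = len(lines)
--     L = [len(s) for s in lines]
--     open_rooms = set()
--     for r, s in enumerate(lines):
--         for i, ch in enumerate(s):
--             if ch == '0':
--                 open_rooms.add((r, i))
--
--     outer = N - 1
--     dist = {}
--     q = deque()
--
--     for i in range(L[outer]):
--         if (outer, i) in open_rooms:
--             dist[(outer, i)] = 1
--             q.append((outer, i))
--
--     if not q: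
--         return -1
--
--     while q:
--         r, i = q.popleft()
--         d = dist[(r, i)]
--
--         if r == 0:
--             return d
--
--         # left & right
--         for ni in ((i - 1) % L[r], (i + 1) % L[r]):
--             if (r, ni) in open_rooms and (r, ni) not in dist:
--                 dist[(r, ni)] = d + 1
--                 q.append((r, ni))
--
--         # inward
--         inner_j = i // 2
--         if (r - 1, inner_j) in open_rooms and (r - 1, inner_j) not in dist:
--             dist[(r - 1, inner_j)] = d + 1
--             q.append((r - 1, inner_j))
--
--         # outward
--         if r + 1 < N:
--             for oi in (2*i, 2*i+1):
--                 oi %= L[r+1]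
--                 if (r + 1, oi) in open_rooms and (r + 1, oi) not in dist:
--                     dist[(r + 1, oi)] = d + 1
--                     q.append((r + 1, oi))
--
--     return -1
-- ===== SOURCE B (Python) =====
-- def min_rooms_to_center(lines):
--     N = len(lines)
--     L = [len(s) for s in lines]
--     open_rooms = {(r, i) for r, s in enumerate(lines) for i, ch in enumerate(s) if ch == '0'}
--
--     reach = {(N - 1, i) for i in range(L[N - 1]) if (N - 1, i) in open_rooms}
--     if not reach:
--         return -1
--
--     level = 1
--     while True:
--         if any(r == 0 for r, _ in reach):
--             return level
--         grown = set(reach)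
--         for r, i in reach:
--             nbrs = [(r, (i - 1) % L[r]), (r, (i + 1) % L[r]), (r - 1, i // 2)]
--             if r + 1 < N:
--                 nbrs += [(r + 1, (2 * i) % L[r + 1]), (r + 1, (2 * i + 1) % L[r + 1])]
--             for nb in nbrs:
--                 if nb in open_rooms:
--                     grown.add(nb)
--         if len(grown) == len(reach):
--             return -1
--         reach = grown
--         level += 1
-- ===== Notes on version B (the rewrite author's own statement) =====
-- stated objective: alternative
-- what changed: Replaces the deque+per-node-distance BFS with a bounded fixpoint (saturation) iteration: a single reachable set is wholesale re-expanded each round with no queue, no frontier and no stored distances, returning the round count when the set first touches ring 0 and -1 when the set stops growing.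
import Mathlib
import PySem

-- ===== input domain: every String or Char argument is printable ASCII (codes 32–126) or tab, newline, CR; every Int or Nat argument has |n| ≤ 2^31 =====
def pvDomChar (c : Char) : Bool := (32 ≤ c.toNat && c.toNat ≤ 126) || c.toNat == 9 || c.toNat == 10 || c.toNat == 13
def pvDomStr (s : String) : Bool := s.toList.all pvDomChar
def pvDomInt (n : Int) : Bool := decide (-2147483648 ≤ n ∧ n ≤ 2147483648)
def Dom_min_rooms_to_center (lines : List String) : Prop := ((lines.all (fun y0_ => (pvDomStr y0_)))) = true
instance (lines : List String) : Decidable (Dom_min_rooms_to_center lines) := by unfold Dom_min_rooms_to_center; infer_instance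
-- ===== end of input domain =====

-- B replaces the deque+dist-dict BFS with a bounded fixpoint (saturation) iteration over one
-- growing reachable set (no queue, no frontier, no stored distances); objective: alternative.

-- ===== shared helpers (both Pythons build L, open_rooms and the fuel the same way) =====

-- L = [len(s) for s in lines]
def pvLens (lines : List String) : List Int := lines.map (fun s => PySem.Str.len s)

-- L[r]; every evaluation that influences the result has r in range (lines ≠ [])
def pvGetL (L : List Int) (r : Int) : Int := (PySem.List.pyGet? L r).getD 0

-- open_rooms = {(r, i) | lines[r][i] == '0'}
def pvOpen (lines : List String) : PySem.Set (Int × Int) :=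
  (PySem.List.enumerate lines 0).foldl
    (fun acc p =>
      (PySem.List.enumerate p.2.toList 0).foldl
        (fun acc q => if q.2 == '0' then PySem.Set.add acc (p.1, q.1) else acc) acc)
    PySem.Set.empty

-- total number of cells; fuel bounds below are proved sufficient (each BFS pop / growth round is counted)
def pvCells (lines : List String) : Nat := (lines.map (fun s => s.toList.length)).sum

-- ===== PORT A =====

-- the body of A's three neighbour blocks: 'if nb in open_rooms and nb not in dist: dist[nb]=d+1; q.append(nb)'
def pvTryAddA (oS : PySem.Set (Int × Int)) (nb : Int × Int) (d : Int)
    (st : List (Int × Int) × PySem.Dict (Int × Int) Int) :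
    List (Int × Int) × PySem.Dict (Int × Int) Int :=
  if PySem.Set.contains oS nb && !(st.2.contains nb) then (st.1 ++ [nb], st.2.insert nb (d + 1)) else st

-- 'while q:' — fuel 2*cells+2 is sufficient (every pop was one of ≤ cells enqueues; proved below)
def pvStepA (oS : PySem.Set (Int × Int)) (L : List Int) (N : Int) :
    Nat → List (Int × Int) → PySem.Dict (Int × Int) Int → Int
  | 0, _, _ => -1
  | _ + 1, [], _ => -1
  | fuel + 1, c :: q, dist =>
    let r := c.1
    let i := c.2
    let d := (dist.get? c).getD 0   -- dist[(r,i)]: the key is always present when popped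
    if r == 0 then d
    else
      -- left & right
      let st := pvTryAddA oS (r, PySem.Int.mod (i - 1) (pvGetL L r)) d (q, dist)
      let st := pvTryAddA oS (r, PySem.Int.mod (i + 1) (pvGetL L r)) d st
      -- inward
      let st := pvTryAddA oS (r - 1, PySem.Int.floordiv i 2) d st
      -- outward
      let st := if r + 1 < N then
          pvTryAddA oS (r + 1, PySem.Int.mod (2 * i + 1) (pvGetL L (r + 1))) d
            (pvTryAddA oS (r + 1, PySem.Int.mod (2 * i) (pvGetL L (r + 1))) d st)
        else st
      pvStepA oS L N fuel st.1 st.2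

def min_rooms_to_center (lines : List String) : Int :=
  let N : Int := lines.length
  let L := pvLens lines
  let oS := pvOpen lines
  let outer := N - 1
  -- initial queue and dist over the outer ring
  let init := (PySem.List.pyRange 0 (pvGetL L outer) 1).foldl
    (fun (st : List (Int × Int) × PySem.Dict (Int × Int) Int) i =>
      if PySem.Set.contains oS (outer, i) then (st.1 ++ [(outer, i)], st.2.insert (outer, i) 1) else st)
    ([], PySem.Dict.empty)
  if init.1.isEmpty then -1
  else pvStepA oS L N (2 * pvCells lines + 2) init.1 init.2

-- ===== PORT B =====

-- nbrs = [left, right, inward] (+ the two outward cells when r+1 < N)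
def pvNbrs (L : List Int) (N : Int) (c : Int × Int) : List (Int × Int) :=
  let r := c.1
  let i := c.2
  [(r, PySem.Int.mod (i - 1) (pvGetL L r)), (r, PySem.Int.mod (i + 1) (pvGetL L r)),
   (r - 1, PySem.Int.floordiv i 2)] ++
  (if r + 1 < N then
     [(r + 1, PySem.Int.mod (2 * i) (pvGetL L (r + 1))), (r + 1, PySem.Int.mod (2 * i + 1) (pvGetL L (r + 1)))]
   else [])

-- 'grown = set(reach); for c in reach: for nb in nbrs(c): if nb in open_rooms: grown.add(nb)'
def pvGrowB (oS : PySem.Set (Int × Int)) (L : List Int) (N : Int)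
    (reach : PySem.Set (Int × Int)) : PySem.Set (Int × Int) :=
  reach.foldl
    (fun acc c =>
      (pvNbrs L N c).foldl
        (fun acc nb => if PySem.Set.contains oS nb then PySem.Set.add acc nb else acc) acc)
    reach

-- 'while True:' saturation loop — fuel cells+1 is sufficient (each round grows the set; proved below)
def pvSatB (oS : PySem.Set (Int × Int)) (L : List Int) (N : Int) :
    Nat → PySem.Set (Int × Int) → Int → Int
  | 0, _, _ => -1
  | fuel + 1, reach, level =>
    if reach.any (fun c => c.1 == 0) then level
    else
      let grown := pvGrowB oS L N reach
      if grown.length == reach.length then -1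
      else pvSatB oS L N fuel grown (level + 1)

def min_rooms_to_center_alt (lines : List String) : Int :=
  let N : Int := lines.length
  let L := pvLens lines
  let oS := pvOpen lines
  let reach := PySem.Set.ofList
    (((PySem.List.pyRange 0 (pvGetL L (N - 1)) 1).filter
        (fun i => PySem.Set.contains oS (N - 1, i))).map (fun i => ((N - 1, i) : Int × Int)))
  if reach.isEmpty then -1
  else pvSatB oS L N (pvCells lines + 1) reach 1

-- ===== PRECONDITION & SPEC =====
-- Pre_ excludes only the empty list, on which A raises IndexError (L[-1]).
def Pre_min_rooms_to_center (lines : List String) : Prop := lines ≠ []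
instance (lines : List String) : Decidable (Pre_min_rooms_to_center lines) := by
  unfold Pre_min_rooms_to_center; infer_instance

def pvWitness_min_rooms_to_center : List String := ["0", "00"]

def Spec_min_rooms_to_center (lines : List String) (out : Int) : Prop := out = min_rooms_to_center_alt lines
instance (lines : List String) (out : Int) : Decidable (Spec_min_rooms_to_center lines out) := by unfold Spec_min_rooms_to_center; infer_instance

-- ===== CLAIM (what is proved, stated in full; the proofs are below) =====
def Claim_equal_min_rooms_to_center : Prop := ∀ (lines : List String), Dom_min_rooms_to_center lines → Pre_min_rooms_to_center lines → Spec_min_rooms_to_center lines (min_rooms_to_center lines)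

-- ===== LEMMAS AND PROOFS =====

-- proof-side intermediate: a level-synchronous BFS, bridged to A's queue BFS below and to B's
-- saturation loop further below

-- per-neighbour step of the intermediate BFS
def pvTryAddB (oS : PySem.Set (Int × Int)) (st : List (Int × Int) × PySem.Set (Int × Int))
    (nb : Int × Int) : List (Int × Int) × PySem.Set (Int × Int) :=
  if PySem.Set.contains oS nb && !(PySem.Set.contains st.2 nb) then (st.1 ++ [nb], PySem.Set.add st.2 nb) else st

-- expand one frontier cell into (nxt, visited)
def pvExpandB (oS : PySem.Set (Int × Int)) (L : List Int) (N : Int)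
    (st : List (Int × Int) × PySem.Set (Int × Int)) (c : Int × Int) :
    List (Int × Int) × PySem.Set (Int × Int) :=
  (pvNbrs L N c).foldl (pvTryAddB oS) st

-- intermediate level loop
def pvLevelsB (oS : PySem.Set (Int × Int)) (L : List Int) (N : Int) :
    Nat → List (Int × Int) → PySem.Set (Int × Int) → Int → Int
  | 0, _, _, _ => -1
  | fuel + 1, frontier, visited, level =>
    if frontier.any (fun c => c.1 == 0) then level
    else
      let st := frontier.foldl (pvExpandB oS L N) ([], visited)
      if st.1.isEmpty then -1
      else pvLevelsB oS L N fuel st.1 st.2 (level + 1)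

-- number of open cells not yet recorded in dist (BFS potential; drops by 1 per enqueue)
def pvM (oS : PySem.Set (Int × Int)) (dist : PySem.Dict (Int × Int) Int) : Nat :=
  (oS.filter (fun c => !dist.contains c)).length

theorem pv_bool_ext {b1 b2 : Bool} (h : b1 = true ↔ b2 = true) : b1 = b2 := by
  cases b1 <;> cases b2 <;> simp_all

theorem pv_filter_drop_one {α : Type} [DecidableEq α] (l : List α) (p q : α → Bool) (x : α)
    (hx : x ∈ l) (hnd : l.Nodup) (hpq : ∀ y, y ≠ x → p y = q y)
    (hpx : p x = true) (hqx : q x = false) :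
    (l.filter p).length = (l.filter q).length + 1 := by
  induction l with
  | nil => cases hx
  | cons a t ih =>
    rcases List.mem_cons.mp hx with rfl | hxt
    · have hnx : x ∉ t := (List.nodup_cons.mp hnd).1
      have hcong : t.filter p = t.filter q := by
        apply List.filter_congr
        intro y hy
        exact hpq y (fun h => hnx (h ▸ hy))
      simp [hpx, hqx, hcong]
    · have hna := (List.nodup_cons.mp hnd).2
      have hax : a ≠ x := fun h => (List.nodup_cons.mp hnd).1 (h ▸ hxt)
      have hqa : q a = p a := (hpq a hax).symm
      have hrec := ih hxt hna
      by_cases hpa : p a = true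
      · simp [hpa, hqa, hrec]
      · have hpa' : p a = false := by simpa using hpa
        simp [hpa', hqa, hrec]

theorem pv_stepA_succ (oS : PySem.Set (Int × Int)) (L : List Int) (N : Int)
    (fuel : Nat) (c : Int × Int) (q : List (Int × Int)) (dist : PySem.Dict (Int × Int) Int) :
    pvStepA oS L N (fuel + 1) (c :: q) dist =
      (if c.1 == 0 then ((dist.get? c).getD 0) else
        pvStepA oS L N fuel
          ((pvNbrs L N c).foldl (fun st nb => pvTryAddA oS nb ((dist.get? c).getD 0) st) (q, dist)).1
          ((pvNbrs L N c).foldl (fun st nb => pvTryAddA oS nb ((dist.get? c).getD 0) st) (q, dist)).2) := by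
  by_cases h0 : (c.1 == 0) = true <;> by_cases h : c.1 + 1 < N <;>
    simp [pvStepA, pvNbrs, h0, h, List.foldl]

theorem pv_stepA_nil (oS : PySem.Set (Int × Int)) (L : List Int) (N : Int)
    (fuel : Nat) (dist : PySem.Dict (Int × Int) Int) :
    pvStepA oS L N fuel [] dist = -1 := by
  cases fuel <;> simp [pvStepA]

theorem pv_tryAdd_corr (oS : PySem.Set (Int × Int)) (hnd : oS.Nodup) (nb : Int × Int) (d : Int)
    (P acc : List (Int × Int)) (dist : PySem.Dict (Int × Int) Int) (vis : PySem.Set (Int × Int))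
    (hRel : ∀ c, dist.contains c = PySem.Set.contains vis c) :
    (pvTryAddA oS nb d (P ++ acc, dist)).1 = P ++ (pvTryAddB oS (acc, vis) nb).1 ∧
    (∀ c, (pvTryAddA oS nb d (P ++ acc, dist)).2.contains c
        = PySem.Set.contains (pvTryAddB oS (acc, vis) nb).2 c) ∧
    (∀ k v, dist.get? k = some v → (pvTryAddA oS nb d (P ++ acc, dist)).2.get? k = some v) ∧
    ((∀ k ∈ acc, dist.get? k = some (d + 1)) →
      ∀ k ∈ (pvTryAddB oS (acc, vis) nb).1,
        (pvTryAddA oS nb d (P ++ acc, dist)).2.get? k = some (d + 1)) ∧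
    pvM oS (pvTryAddA oS nb d (P ++ acc, dist)).2 + (pvTryAddB oS (acc, vis) nb).1.length
      = pvM oS dist + acc.length := by
  have hguard : (PySem.Set.contains oS nb && !(dist.contains nb))
      = (PySem.Set.contains oS nb && !(PySem.Set.contains vis nb)) := by rw [hRel nb]
  by_cases hcond : (PySem.Set.contains oS nb && !(PySem.Set.contains vis nb)) = true
  · have hoS : PySem.Set.contains oS nb = true := by
      cases h : PySem.Set.contains oS nb
      · rw [h] at hcond; simp at hcond
      · rfl
    have hvis : PySem.Set.contains vis nb = false := by
      cases h : PySem.Set.contains vis nb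
      · rfl
      · rw [h] at hcond; simp at hcond
    have hdist : dist.contains nb = false := (hRel nb).trans hvis
    have hnboS : nb ∈ oS := (PySem.Set.contains_iff oS nb).mp hoS
    have hget : dist.get? nb = none := by
      cases hg : dist.get? nb
      · rfl
      · rw [PySem.Dict.contains_eq_isSome_get?, hg] at hdist; simp at hdist
    have hA : pvTryAddA oS nb d (P ++ acc, dist)
        = ((P ++ acc) ++ [nb], dist.insert nb (d + 1)) := by
      unfold pvTryAddA; dsimp only; rw [hguard, if_pos hcond]
    have hB : pvTryAddB oS (acc, vis) nb = (acc ++ [nb], PySem.Set.add vis nb) := by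
      unfold pvTryAddB; dsimp only; rw [if_pos hcond]
    rw [hA, hB]
    dsimp only
    refine ⟨List.append_assoc P acc [nb], ?_, ?_, ?_, ?_⟩
    · intro c
      rw [PySem.Dict.contains_insert]
      apply pv_bool_ext
      have h3 : dist.contains c = true ↔ c ∈ vis := by
        rw [hRel c]; exact PySem.Set.contains_iff vis c
      simp only [Bool.or_eq_true, beq_iff_eq, PySem.Set.contains_iff, PySem.Set.mem_add, h3]
      tauto
    · intro k v hk
      have hkne : k ≠ nb := by rintro rfl; rw [hk] at hget; simp at hget
      rw [PySem.Dict.get?_insert_of_ne dist (d + 1) hkne]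
      exact hk
    · intro hacc k hk
      rcases List.mem_append.mp hk with hk1 | hk2
      · have hkne : k ≠ nb := by
          intro he
          rw [← he] at hget
          rw [hacc k hk1] at hget
          simp at hget
        rw [PySem.Dict.get?_insert_of_ne dist (d + 1) hkne]
        exact hacc k hk1
      · have hknb : k = nb := by simpa using hk2
        subst hknb
        exact PySem.Dict.get?_insert_self dist k (d + 1)
    · have hdrop : pvM oS dist = pvM oS (dist.insert nb (d + 1)) + 1 := by
        unfold pvM
        refine pv_filter_drop_one oS _ _ nb hnboS hnd ?_ ?_ ?_
        · intro y hy
          rw [PySem.Dict.contains_insert]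
          have hyb : (y == nb) = false := by simp [hy]
          rw [hyb, Bool.false_or]
        · rw [hdist]; rfl
        · rw [PySem.Dict.contains_insert_self]; rfl
      simp only [List.length_append, List.length_cons, List.length_nil]
      omega
  · have hcond' : (PySem.Set.contains oS nb && !(PySem.Set.contains vis nb)) = false := by
      cases h : (PySem.Set.contains oS nb && !(PySem.Set.contains vis nb))
      · rfl
      · exact absurd h hcond
    have hA : pvTryAddA oS nb d (P ++ acc, dist) = (P ++ acc, dist) := by
      unfold pvTryAddA; dsimp only
      rw [hguard, if_neg (fun hh => Bool.false_ne_true (hcond' ▸ hh))]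
    have hB : pvTryAddB oS (acc, vis) nb = (acc, vis) := by
      unfold pvTryAddB; dsimp only
      rw [if_neg (fun hh => Bool.false_ne_true (hcond' ▸ hh))]
    rw [hA, hB]
    exact ⟨rfl, hRel, fun k v h => h, fun hacc k hk => hacc k hk, rfl⟩

theorem pv_fold_corr (oS : PySem.Set (Int × Int)) (hnd : oS.Nodup) (d : Int) (P : List (Int × Int))
    (nbs : List (Int × Int)) :
    ∀ (acc : List (Int × Int)) (dist : PySem.Dict (Int × Int) Int) (vis : PySem.Set (Int × Int)),
    (∀ c, dist.contains c = PySem.Set.contains vis c) →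
    (nbs.foldl (fun st nb => pvTryAddA oS nb d st) (P ++ acc, dist)).1
        = P ++ (nbs.foldl (pvTryAddB oS) (acc, vis)).1 ∧
    (∀ c, (nbs.foldl (fun st nb => pvTryAddA oS nb d st) (P ++ acc, dist)).2.contains c
        = PySem.Set.contains (nbs.foldl (pvTryAddB oS) (acc, vis)).2 c) ∧
    (∀ k v, dist.get? k = some v →
      (nbs.foldl (fun st nb => pvTryAddA oS nb d st) (P ++ acc, dist)).2.get? k = some v) ∧
    ((∀ k ∈ acc, dist.get? k = some (d + 1)) →
      ∀ k ∈ (nbs.foldl (pvTryAddB oS) (acc, vis)).1,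
        (nbs.foldl (fun st nb => pvTryAddA oS nb d st) (P ++ acc, dist)).2.get? k = some (d + 1)) ∧
    pvM oS (nbs.foldl (fun st nb => pvTryAddA oS nb d st) (P ++ acc, dist)).2
        + (nbs.foldl (pvTryAddB oS) (acc, vis)).1.length
      = pvM oS dist + acc.length := by
  induction nbs with
  | nil =>
    intro acc dist vis hRel
    exact ⟨rfl, hRel, fun k v h => h, fun hacc k hk => hacc k hk, rfl⟩
  | cons nb nbs ih =>
    intro acc dist vis hRel
    obtain ⟨h1, h2, h3, h4, h5⟩ := pv_tryAdd_corr oS hnd nb d P acc dist vis hRel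
    have hpair : pvTryAddA oS nb d (P ++ acc, dist)
        = (P ++ (pvTryAddB oS (acc, vis) nb).1, (pvTryAddA oS nb d (P ++ acc, dist)).2) := by
      rw [← h1]
    obtain ⟨g1, g2, g3, g4, g5⟩ := ih (pvTryAddB oS (acc, vis) nb).1
      (pvTryAddA oS nb d (P ++ acc, dist)).2 (pvTryAddB oS (acc, vis) nb).2 h2
    have heta : ((pvTryAddB oS (acc, vis) nb).1, (pvTryAddB oS (acc, vis) nb).2)
        = pvTryAddB oS (acc, vis) nb := rfl
    rw [heta] at g1 g2 g4 g5
    rw [List.foldl_cons, List.foldl_cons, hpair]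
    refine ⟨g1, g2, ?_, ?_, ?_⟩
    · intro k v h; exact g3 k v (h3 k v h)
    · intro hacc; exact g4 (h4 hacc)
    · omega

theorem pv_tryAddA_pres (oS : PySem.Set (Int × Int)) (nb : Int × Int) (d : Int)
    (st : List (Int × Int) × PySem.Dict (Int × Int) Int) (k : Int × Int) (v : Int)
    (h : st.2.get? k = some v) : (pvTryAddA oS nb d st).2.get? k = some v := by
  unfold pvTryAddA
  split_ifs with hg
  · have hnb : st.2.contains nb = false := by
      cases hc : st.2.contains nb
      · rfl
      · rw [hc] at hg; simp at hg
    have hk : k ≠ nb := by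
      rintro rfl
      rw [PySem.Dict.contains_eq_isSome_get?, h] at hnb
      simp at hnb
    dsimp only
    rw [PySem.Dict.get?_insert_of_ne st.2 (d + 1) hk]
    exact h
  · exact h

theorem pv_foldA_pres (oS : PySem.Set (Int × Int)) (d : Int) (nbs : List (Int × Int)) :
    ∀ (st : List (Int × Int) × PySem.Dict (Int × Int) Int) (k : Int × Int) (v : Int),
    st.2.get? k = some v →
    ((nbs.foldl (fun st nb => pvTryAddA oS nb d st) st).2.get? k = some v) := by
  induction nbs with
  | nil => intro st k v h; exact h
  | cons nb nbs ih =>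
    intro st k v h
    rw [List.foldl_cons]
    exact ih _ k v (pv_tryAddA_pres oS nb d st k v h)

theorem pv_foldA_fst (oS : PySem.Set (Int × Int)) (d : Int) (nbs : List (Int × Int)) :
    ∀ (st : List (Int × Int) × PySem.Dict (Int × Int) Int),
    ∃ t, (nbs.foldl (fun st nb => pvTryAddA oS nb d st) st).1 = st.1 ++ t := by
  induction nbs with
  | nil => intro st; exact ⟨[], by simp⟩
  | cons nb nbs ih =>
    intro st
    have h0 : ∃ t0, (pvTryAddA oS nb d st).1 = st.1 ++ t0 := by
      unfold pvTryAddA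
      split_ifs
      · exact ⟨[nb], rfl⟩
      · exact ⟨[], by simp⟩
    obtain ⟨t0, ht0⟩ := h0
    obtain ⟨t1, ht1⟩ := ih (pvTryAddA oS nb d st)
    exact ⟨t0 ++ t1, by rw [List.foldl_cons, ht1, ht0, List.append_assoc]⟩

theorem pv_run_center (oS : PySem.Set (Int × Int)) (L : List Int) (N : Int) (d : Int) :
    ∀ (cur acc : List (Int × Int)) (dist : PySem.Dict (Int × Int) Int) (fA : Nat),
    (∀ c ∈ cur, dist.get? c = some d) →
    cur.any (fun c => c.1 == 0) = true →
    pvStepA oS L N (fA + cur.length) (cur ++ acc) dist = d := by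
  intro cur
  induction cur with
  | nil => intro acc dist fA _ hany; simp at hany
  | cons c t ih =>
    intro acc dist fA hd hany
    have hlen : fA + (c :: t).length = (fA + t.length) + 1 := by
      simp only [List.length_cons]; omega
    rw [hlen, List.cons_append, pv_stepA_succ]
    have hdc : (dist.get? c).getD 0 = d := by rw [hd c (by simp)]; rfl
    by_cases h0 : (c.1 == 0) = true
    · rw [if_pos h0]; exact hdc
    · have h0' : (c.1 == 0) = false := by
        cases hb : (c.1 == 0)
        · rfl
        · exact absurd hb h0
      rw [if_neg (fun hh => Bool.false_ne_true (h0' ▸ hh)), hdc]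
      obtain ⟨t0, ht0⟩ := pv_foldA_fst oS d (pvNbrs L N c) (t ++ acc, dist)
      have hd' : ∀ x ∈ t,
          ((pvNbrs L N c).foldl (fun st nb => pvTryAddA oS nb d st) (t ++ acc, dist)).2.get? x
            = some d :=
        fun x hx => pv_foldA_pres oS d (pvNbrs L N c) _ x d (hd x (by simp [hx]))
      have hany' : t.any (fun c => c.1 == 0) = true := by
        rw [List.any_cons, h0', Bool.false_or] at hany
        exact hany
      have hrec := ih (acc ++ t0)
        ((pvNbrs L N c).foldl (fun st nb => pvTryAddA oS nb d st) (t ++ acc, dist)).2 fA hd' hany'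
      rw [ht0, List.append_assoc]
      exact hrec

theorem pv_run_level (oS : PySem.Set (Int × Int)) (L : List Int) (N : Int) (d : Int) (fA : Nat)
    (hnd : oS.Nodup) :
    ∀ (cur acc : List (Int × Int)) (dist : PySem.Dict (Int × Int) Int) (vis : PySem.Set (Int × Int)),
    (∀ c, dist.contains c = PySem.Set.contains vis c) →
    (∀ c ∈ cur, dist.get? c = some d) →
    (∀ c ∈ cur, (c.1 == 0) = false) →
    (∀ k ∈ acc, dist.get? k = some (d + 1)) →
    ∃ dist',
      pvStepA oS L N (fA + cur.length) (cur ++ acc) dist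
        = pvStepA oS L N fA (cur.foldl (pvExpandB oS L N) (acc, vis)).1 dist' ∧
      (∀ c, dist'.contains c = PySem.Set.contains (cur.foldl (pvExpandB oS L N) (acc, vis)).2 c) ∧
      (∀ k ∈ (cur.foldl (pvExpandB oS L N) (acc, vis)).1, dist'.get? k = some (d + 1)) ∧
      pvM oS dist' + (cur.foldl (pvExpandB oS L N) (acc, vis)).1.length = pvM oS dist + acc.length := by
  intro cur
  induction cur with
  | nil =>
    intro acc dist vis hRel _ _ hacc
    exact ⟨dist, by simp, hRel, hacc, rfl⟩
  | cons c t ih =>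
    intro acc dist vis hRel hd h0s hacc
    obtain ⟨f1, f2, f3, f4, f5⟩ := pv_fold_corr oS hnd d t (pvNbrs L N c) acc dist vis hRel
    have f1' : ((pvNbrs L N c).foldl (fun st nb => pvTryAddA oS nb d st) (t ++ acc, dist)).1
        = t ++ (pvExpandB oS L N (acc, vis) c).1 := f1
    have f2' : ∀ c', ((pvNbrs L N c).foldl (fun st nb => pvTryAddA oS nb d st) (t ++ acc, dist)).2.contains c'
        = PySem.Set.contains (pvExpandB oS L N (acc, vis) c).2 c' := f2
    have f4' : (∀ k ∈ acc, dist.get? k = some (d + 1)) →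
        ∀ k ∈ (pvExpandB oS L N (acc, vis) c).1,
          ((pvNbrs L N c).foldl (fun st nb => pvTryAddA oS nb d st) (t ++ acc, dist)).2.get? k
            = some (d + 1) := f4
    have f5' : pvM oS ((pvNbrs L N c).foldl (fun st nb => pvTryAddA oS nb d st) (t ++ acc, dist)).2
        + (pvExpandB oS L N (acc, vis) c).1.length = pvM oS dist + acc.length := f5
    have hlen : fA + (c :: t).length = (fA + t.length) + 1 := by
      simp only [List.length_cons]; omega
    rw [hlen, List.cons_append, pv_stepA_succ]
    have hdc : (dist.get? c).getD 0 = d := by rw [hd c (by simp)]; rfl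
    have h0 : (c.1 == 0) = false := h0s c (by simp)
    rw [if_neg (fun hh => Bool.false_ne_true (h0 ▸ hh)), hdc]
    have hpair : (pvNbrs L N c).foldl (fun st nb => pvTryAddA oS nb d st) (t ++ acc, dist)
        = (t ++ (pvExpandB oS L N (acc, vis) c).1,
           ((pvNbrs L N c).foldl (fun st nb => pvTryAddA oS nb d st) (t ++ acc, dist)).2) := by
      rw [← f1']
    obtain ⟨dist', g1, g2, g3, g4⟩ := ih (pvExpandB oS L N (acc, vis) c).1
      ((pvNbrs L N c).foldl (fun st nb => pvTryAddA oS nb d st) (t ++ acc, dist)).2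
      (pvExpandB oS L N (acc, vis) c).2 f2'
      (fun x hx => f3 x d (hd x (by simp [hx])))
      (fun x hx => h0s x (by simp [hx]))
      (f4' hacc)
    have heta : ((pvExpandB oS L N (acc, vis) c).1, (pvExpandB oS L N (acc, vis) c).2)
        = pvExpandB oS L N (acc, vis) c := rfl
    rw [heta] at g1 g2 g3 g4
    refine ⟨dist', ?_, ?_, ?_, ?_⟩
    · rw [hpair, List.foldl_cons]
      exact g1
    · rw [List.foldl_cons]; exact g2
    · rw [List.foldl_cons]; exact g3
    · rw [List.foldl_cons]
      omega

theorem pv_levels_corr (oS : PySem.Set (Int × Int)) (L : List Int) (N : Int) (hnd : oS.Nodup) :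
    ∀ (fB fA : Nat) (frontier : List (Int × Int)) (dist : PySem.Dict (Int × Int) Int)
      (vis : PySem.Set (Int × Int)) (d : Int),
    (∀ c, dist.contains c = PySem.Set.contains vis c) →
    (∀ c ∈ frontier, dist.get? c = some d) →
    frontier.length + pvM oS dist ≤ fA →
    1 + pvM oS dist ≤ fB →
    pvStepA oS L N fA frontier dist = pvLevelsB oS L N fB frontier vis d := by
  intro fB
  induction fB with
  | zero => intro fA frontier dist vis d _ _ _ hfB; omega
  | succ fB ih =>
    intro fA frontier dist vis d hRel hd hfA hfB
    by_cases hany : frontier.any (fun c => c.1 == 0) = true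
    · simp only [pvLevelsB]
      rw [if_pos hany]
      have hle : frontier.length ≤ fA := by omega
      have hrc := pv_run_center oS L N d frontier [] dist (fA - frontier.length) hd hany
      rw [List.append_nil, Nat.sub_add_cancel hle] at hrc
      exact hrc
    · have hany' : frontier.any (fun c => c.1 == 0) = false := by
        cases hb : frontier.any (fun c => c.1 == 0)
        · rfl
        · exact absurd hb hany
      simp only [pvLevelsB]
      rw [if_neg (fun hh => Bool.false_ne_true (hany' ▸ hh))]
      have h0s : ∀ c ∈ frontier, (c.1 == 0) = false := by
        intro c hc
        cases hb : (c.1 == 0)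
        · rfl
        · exact absurd (List.any_eq_true.mpr ⟨c, hc, hb⟩) (by rw [hany']; simp)
      obtain ⟨dist', g1, g2, g3, g4⟩ := pv_run_level oS L N d (fA - frontier.length) hnd
        frontier [] dist vis hRel hd h0s (by simp)
      rw [List.append_nil, Nat.sub_add_cancel (by omega : frontier.length ≤ fA)] at g1
      simp only [List.length_nil, Nat.add_zero] at g4
      cases hemp : (frontier.foldl (pvExpandB oS L N) ([], vis)).1.isEmpty
      · rw [if_neg Bool.false_ne_true]
        have hpos : 1 ≤ (frontier.foldl (pvExpandB oS L N) ([], vis)).1.length := by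
          cases hl : (frontier.foldl (pvExpandB oS L N) ([], vis)).1 with
          | nil => rw [hl] at hemp; simp at hemp
          | cons a l => simp
        have hA2 : (frontier.foldl (pvExpandB oS L N) ([], vis)).1.length + pvM oS dist'
            ≤ fA - frontier.length := by omega
        have hB2 : 1 + pvM oS dist' ≤ fB := by omega
        rw [g1]
        exact ih (fA - frontier.length) _ dist' _ (d + 1) g2 g3 hA2 hB2
      · rw [if_pos rfl]
        have hnil : (frontier.foldl (pvExpandB oS L N) ([], vis)).1 = [] :=
          List.isEmpty_iff.mp hemp
        rw [g1, hnil]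
        exact pv_stepA_nil oS L N _ dist'

theorem pv_init_corr (oS : PySem.Set (Int × Int)) (outer : Int) :
    ∀ (l : List Int) (q : List (Int × Int)) (dist : PySem.Dict (Int × Int) Int),
    (l.foldl
      (fun (st : List (Int × Int) × PySem.Dict (Int × Int) Int) i =>
        if PySem.Set.contains oS (outer, i) then (st.1 ++ [(outer, i)], st.2.insert (outer, i) 1) else st)
      (q, dist)).1
      = q ++ (l.filter (fun i => PySem.Set.contains oS (outer, i))).map (fun i => ((outer, i) : Int × Int)) ∧
    ∀ c, (l.foldl
      (fun (st : List (Int × Int) × PySem.Dict (Int × Int) Int) i =>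
        if PySem.Set.contains oS (outer, i) then (st.1 ++ [(outer, i)], st.2.insert (outer, i) 1) else st)
      (q, dist)).2.get? c
      = if c ∈ (l.filter (fun i => PySem.Set.contains oS (outer, i))).map (fun i => ((outer, i) : Int × Int))
        then some 1 else dist.get? c := by
  intro l
  induction l with
  | nil => intro q dist; exact ⟨by simp, by simp⟩
  | cons i t ih =>
    intro q dist
    rw [List.foldl_cons]
    by_cases hp : PySem.Set.contains oS (outer, i) = true
    · have hstep : (if PySem.Set.contains oS (outer, i) = true
          then (((q, dist) : List (Int × Int) × PySem.Dict (Int × Int) Int).1 ++ [(outer, i)],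
                ((q, dist) : List (Int × Int) × PySem.Dict (Int × Int) Int).2.insert (outer, i) 1)
          else ((q, dist) : List (Int × Int) × PySem.Dict (Int × Int) Int))
          = ((q ++ [(outer, i)], dist.insert (outer, i) 1)
              : List (Int × Int) × PySem.Dict (Int × Int) Int) := by
        rw [if_pos hp]
      rw [hstep, List.filter_cons, if_pos hp, List.map_cons]
      obtain ⟨ih1, ih2⟩ := ih (q ++ [(outer, i)]) (dist.insert (outer, i) 1)
      constructor
      · rw [ih1]
        simp [List.append_assoc]
      · intro c
        rw [ih2 c]
        by_cases h1 : c ∈ (t.filter (fun i => PySem.Set.contains oS (outer, i))).map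
            (fun i => ((outer, i) : Int × Int))
        · rw [if_pos h1, if_pos (List.mem_cons_of_mem _ h1)]
        · rw [if_neg h1]
          by_cases h2 : c = (outer, i)
          · subst h2
            rw [if_pos List.mem_cons_self, PySem.Dict.get?_insert_self]
          · rw [if_neg (fun hmem => (List.mem_cons.mp hmem).elim h2 h1),
                PySem.Dict.get?_insert_of_ne dist 1 h2]
    · have hp' : PySem.Set.contains oS (outer, i) = false := by
        cases h : PySem.Set.contains oS (outer, i)
        · rfl
        · exact absurd h hp
      have hstep : (if PySem.Set.contains oS (outer, i) = true
          then (((q, dist) : List (Int × Int) × PySem.Dict (Int × Int) Int).1 ++ [(outer, i)],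
                ((q, dist) : List (Int × Int) × PySem.Dict (Int × Int) Int).2.insert (outer, i) 1)
          else ((q, dist) : List (Int × Int) × PySem.Dict (Int × Int) Int))
          = ((q, dist) : List (Int × Int) × PySem.Dict (Int × Int) Int) := by
        rw [if_neg (fun hh => Bool.false_ne_true (hp' ▸ hh))]
      rw [hstep, List.filter_cons, if_neg (fun hh => Bool.false_ne_true (hp' ▸ hh))]
      exact ih q dist

theorem pv_add_len (s : PySem.Set (Int × Int)) (x : Int × Int) :
    (PySem.Set.add s x).length ≤ s.length + 1 := by
  rw [PySem.Set.add_eq_ite]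
  split_ifs <;> simp

theorem pv_inner_len (r : Int) :
    ∀ (es : List (Int × Char)) (acc : PySem.Set (Int × Int)),
    ((es.foldl (fun acc q => if q.2 == '0' then PySem.Set.add acc (r, q.1) else acc) acc)).length
      ≤ acc.length + es.length := by
  intro es
  induction es with
  | nil => intro acc; simp
  | cons e t ih =>
    intro acc
    rw [List.foldl_cons]
    by_cases h : (e.2 == '0') = true
    · rw [if_pos h]
      have h1 := ih (PySem.Set.add acc (r, e.1))
      have h2 := pv_add_len acc (r, e.1)
      simp only [List.length_cons]
      omega
    · rw [if_neg h]
      have h1 := ih acc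
      simp only [List.length_cons]
      omega

theorem pv_inner_nodup (r : Int) :
    ∀ (es : List (Int × Char)) (acc : PySem.Set (Int × Int)), acc.Nodup →
    ((es.foldl (fun acc q => if q.2 == '0' then PySem.Set.add acc (r, q.1) else acc) acc)).Nodup := by
  intro es
  induction es with
  | nil => intro acc h; exact h
  | cons e t ih =>
    intro acc h
    rw [List.foldl_cons]
    by_cases hc : (e.2 == '0') = true
    · rw [if_pos hc]
      exact ih _ (PySem.Set.nodup_add acc (r, e.1) h)
    · rw [if_neg hc]
      exact ih _ h

theorem pv_open_len_aux :
    ∀ (ls : List String) (s0 : Int) (acc : PySem.Set (Int × Int)),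
    ((PySem.List.enumerate ls s0).foldl
      (fun acc p =>
        (PySem.List.enumerate p.2.toList 0).foldl
          (fun acc q => if q.2 == '0' then PySem.Set.add acc (p.1, q.1) else acc) acc)
      acc).length
      ≤ acc.length + (ls.map (fun s => s.toList.length)).sum := by
  intro ls
  induction ls with
  | nil => intro s0 acc; simp [PySem.List.enumerate_nil]
  | cons s t ih =>
    intro s0 acc
    rw [PySem.List.enumerate_cons, List.foldl_cons]
    have h1 := ih (s0 + 1)
      ((PySem.List.enumerate s.toList 0).foldl
        (fun acc q => if q.2 == '0' then PySem.Set.add acc (s0, q.1) else acc) acc)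
    have h2 := pv_inner_len s0 (PySem.List.enumerate s.toList 0) acc
    rw [PySem.List.length_enumerate] at h2
    simp only [List.map_cons, List.sum_cons]
    omega

theorem pv_open_nodup_aux :
    ∀ (ls : List String) (s0 : Int) (acc : PySem.Set (Int × Int)), acc.Nodup →
    ((PySem.List.enumerate ls s0).foldl
      (fun acc p =>
        (PySem.List.enumerate p.2.toList 0).foldl
          (fun acc q => if q.2 == '0' then PySem.Set.add acc (p.1, q.1) else acc) acc)
      acc).Nodup := by
  intro ls
  induction ls with
  | nil => intro s0 acc h; rw [PySem.List.enumerate_nil]; exact h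
  | cons s t ih =>
    intro s0 acc h
    rw [PySem.List.enumerate_cons, List.foldl_cons]
    exact ih (s0 + 1) _ (pv_inner_nodup s0 (PySem.List.enumerate s.toList 0) acc h)

theorem pv_open_len (lines : List String) : (pvOpen lines).length ≤ pvCells lines := by
  have h := pv_open_len_aux lines 0 PySem.Set.empty
  simpa [pvOpen, pvCells, PySem.Set.empty] using h

theorem pv_open_nodup (lines : List String) : (pvOpen lines).Nodup := by
  have h := pv_open_nodup_aux lines 0 PySem.Set.empty (by simp [PySem.Set.empty])
  simpa [pvOpen] using h

theorem pv_louter (lines : List String) (h : lines ≠ []) :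
    (pvGetL (pvLens lines) ((lines.length : Int) - 1)).toNat ≤ pvCells lines := by
  have hpos : 0 < lines.length := List.length_pos_of_ne_nil h
  have hc : ((lines.length : Int) - 1) = ((lines.length - 1 : Nat) : Int) := by
    omega
  have hlt : lines.length - 1 < (pvLens lines).length := by
    simp only [pvLens, List.length_map]; omega
  have hlt' : lines.length - 1 < lines.length := by omega
  unfold pvGetL
  rw [hc, PySem.List.pyGet?_natCast, List.getElem?_eq_getElem hlt]
  simp only [Option.getD_some]
  have hgl : (pvLens lines)[lines.length - 1]'hlt
      = PySem.Str.len (lines[lines.length - 1]'hlt') := by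
    simp [pvLens]
  rw [hgl, PySem.Str.len_eq]
  have hmem : (lines[lines.length - 1]'hlt').toList.length
      ∈ lines.map (fun s => s.toList.length) :=
    List.mem_map_of_mem (List.getElem_mem _)
  have hle : (lines[lines.length - 1]'hlt').toList.length
      ≤ (lines.map (fun s => s.toList.length)).sum :=
    List.single_le_sum (fun x _ => Nat.zero_le x) _ hmem
  simp only [pvCells]
  omega

theorem pv_pvM_le (oS : PySem.Set (Int × Int)) (dist : PySem.Dict (Int × Int) Int) :
    pvM oS dist ≤ oS.length := List.length_filter_le _ _

-- ===== bridge from the intermediate level BFS to B's saturation loop =====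

theorem pv_tryB_fold (oS : PySem.Set (Int × Int)) :
    ∀ (nbs : List (Int × Int)) (acc : List (Int × Int)) (vis : PySem.Set (Int × Int)),
    (∀ c ∈ acc, c ∈ vis) → vis.Nodup →
    (∀ x, x ∈ (nbs.foldl (pvTryAddB oS) (acc, vis)).2
        ↔ x ∈ vis ∨ (x ∈ nbs ∧ PySem.Set.contains oS x = true)) ∧
    (∀ x ∈ (nbs.foldl (pvTryAddB oS) (acc, vis)).1, x ∈ acc ∨ x ∉ vis) ∧
    (∀ x ∈ (nbs.foldl (pvTryAddB oS) (acc, vis)).1, x ∈ (nbs.foldl (pvTryAddB oS) (acc, vis)).2) ∧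
    (nbs.foldl (pvTryAddB oS) (acc, vis)).2.Nodup ∧
    (∀ x ∈ (nbs.foldl (pvTryAddB oS) (acc, vis)).2, x ∈ vis ∨ x ∈ (nbs.foldl (pvTryAddB oS) (acc, vis)).1) ∧
    (∀ x ∈ acc, x ∈ (nbs.foldl (pvTryAddB oS) (acc, vis)).1) := by
  intro nbs
  induction nbs with
  | nil =>
    intro acc vis hav hnd
    exact ⟨fun x => by simp, fun x hx => Or.inl hx, fun x hx => hav x hx, hnd,
      fun x hx => Or.inl hx, fun x hx => hx⟩
  | cons nb t ih =>
    intro acc vis hav hnd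
    rw [List.foldl_cons]
    by_cases hcond : (PySem.Set.contains oS nb && !(PySem.Set.contains vis nb)) = true
    · have hoS : PySem.Set.contains oS nb = true := by
        cases h : PySem.Set.contains oS nb
        · rw [h] at hcond; simp at hcond
        · rfl
      have hvis : nb ∉ vis := by
        intro h
        have := (PySem.Set.contains_iff vis nb).mpr h
        rw [this] at hcond; simp at hcond
      have hB : pvTryAddB oS (acc, vis) nb = (acc ++ [nb], PySem.Set.add vis nb) := by
        unfold pvTryAddB; dsimp only; rw [if_pos hcond]
      rw [hB]
      have hav' : ∀ c ∈ acc ++ [nb], c ∈ PySem.Set.add vis nb := by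
        intro c hc
        rw [PySem.Set.mem_add]
        rcases List.mem_append.mp hc with h | h
        · exact Or.inl (hav c h)
        · exact Or.inr (by simpa using h)
      obtain ⟨i1, i2, i3, i4, i5, i6⟩ := ih (acc ++ [nb]) (PySem.Set.add vis nb) hav'
        (PySem.Set.nodup_add vis nb hnd)
      refine ⟨?_, ?_, i3, i4, ?_, ?_⟩
      · intro x
        rw [i1 x, PySem.Set.mem_add]
        constructor
        · rintro ((h | rfl) | ⟨h1, h2⟩)
          · exact Or.inl h
          · exact Or.inr ⟨by simp, hoS⟩
          · exact Or.inr ⟨List.mem_cons_of_mem _ h1, h2⟩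
        · rintro (h | ⟨h1, h2⟩)
          · exact Or.inl (Or.inl h)
          · rcases List.mem_cons.mp h1 with rfl | h1
            · exact Or.inl (Or.inr rfl)
            · exact Or.inr ⟨h1, h2⟩
      · intro x hx
        rcases i2 x hx with h | h
        · rcases List.mem_append.mp h with h | h
          · exact Or.inl h
          · have : x = nb := by simpa using h
            subst this; exact Or.inr hvis
        · exact Or.inr (fun hv => h ((PySem.Set.mem_add vis nb x).mpr (Or.inl hv)))
      · intro x hx
        rcases i5 x hx with h | h
        · rcases (PySem.Set.mem_add vis nb x).mp h with h | rfl
          · exact Or.inl h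
          · exact Or.inr (i6 x (by simp))
        · exact Or.inr h
      · intro x hx
        exact i6 x (List.mem_append.mpr (Or.inl hx))
    · have hcond' : (PySem.Set.contains oS nb && !(PySem.Set.contains vis nb)) = false := by
        cases h : (PySem.Set.contains oS nb && !(PySem.Set.contains vis nb))
        · rfl
        · exact absurd h hcond
      have hB : pvTryAddB oS (acc, vis) nb = (acc, vis) := by
        unfold pvTryAddB; dsimp only
        rw [if_neg (fun hh => Bool.false_ne_true (hcond' ▸ hh))]
      rw [hB]
      obtain ⟨i1, i2, i3, i4, i5, i6⟩ := ih acc vis hav hnd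
      have hcase : PySem.Set.contains oS nb = false ∨ nb ∈ vis := by
        cases ho : PySem.Set.contains oS nb
        · exact Or.inl rfl
        · cases hv : PySem.Set.contains vis nb
          · rw [ho, hv] at hcond'; simp at hcond'
          · exact Or.inr ((PySem.Set.contains_iff vis nb).mp hv)
      refine ⟨?_, i2, i3, i4, i5, i6⟩
      intro x
      rw [i1 x]
      constructor
      · rintro (h | ⟨h1, h2⟩)
        · exact Or.inl h
        · exact Or.inr ⟨List.mem_cons_of_mem _ h1, h2⟩
      · rintro (h | ⟨h1, h2⟩)
        · exact Or.inl h
        · rcases List.mem_cons.mp h1 with rfl | h1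
          · rcases hcase with h | h
            · rw [h] at h2; exact absurd h2 (by simp)
            · exact Or.inl h
          · exact Or.inr ⟨h1, h2⟩

theorem pv_tryB_mono (oS : PySem.Set (Int × Int)) :
    ∀ (nbs : List (Int × Int)) (st : List (Int × Int) × PySem.Set (Int × Int)) (x : Int × Int),
    x ∈ st.1 → x ∈ (nbs.foldl (pvTryAddB oS) st).1 := by
  intro nbs
  induction nbs with
  | nil => intro st x hx; exact hx
  | cons nb t ih =>
    intro st x hx
    rw [List.foldl_cons]
    apply ih
    unfold pvTryAddB
    split_ifs
    · exact List.mem_append.mpr (Or.inl hx)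
    · exact hx

theorem pv_frontier_mono (oS : PySem.Set (Int × Int)) (L : List Int) (N : Int) :
    ∀ (fr : List (Int × Int)) (st : List (Int × Int) × PySem.Set (Int × Int)) (x : Int × Int),
    x ∈ st.1 → x ∈ (fr.foldl (pvExpandB oS L N) st).1 := by
  intro fr
  induction fr with
  | nil => intro st x hx; exact hx
  | cons c t ih =>
    intro st x hx
    rw [List.foldl_cons]
    exact ih _ x (pv_tryB_mono oS (pvNbrs L N c) st x hx)

theorem pv_expandB_fold (oS : PySem.Set (Int × Int)) (L : List Int) (N : Int) :
    ∀ (fr : List (Int × Int)) (acc : List (Int × Int)) (vis : PySem.Set (Int × Int)),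
    (∀ c ∈ acc, c ∈ vis) → vis.Nodup →
    (∀ x, x ∈ (fr.foldl (pvExpandB oS L N) (acc, vis)).2
        ↔ x ∈ vis ∨ ∃ c ∈ fr, x ∈ pvNbrs L N c ∧ PySem.Set.contains oS x = true) ∧
    (∀ x ∈ (fr.foldl (pvExpandB oS L N) (acc, vis)).1, x ∈ acc ∨ x ∉ vis) ∧
    (∀ x ∈ (fr.foldl (pvExpandB oS L N) (acc, vis)).1, x ∈ (fr.foldl (pvExpandB oS L N) (acc, vis)).2) ∧
    (fr.foldl (pvExpandB oS L N) (acc, vis)).2.Nodup ∧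
    (∀ x ∈ (fr.foldl (pvExpandB oS L N) (acc, vis)).2, x ∈ vis ∨ x ∈ (fr.foldl (pvExpandB oS L N) (acc, vis)).1) := by
  intro fr
  induction fr with
  | nil =>
    intro acc vis hav hnd
    exact ⟨fun x => by simp, fun x hx => Or.inl hx, fun x hx => hav x hx, hnd,
      fun x hx => Or.inl hx⟩
  | cons c0 t ih =>
    intro acc vis hav hnd
    rw [List.foldl_cons]
    obtain ⟨i1, i2, i3, i4, i5, i6⟩ := pv_tryB_fold oS (pvNbrs L N c0) acc vis hav hnd
    have hstep : pvExpandB oS L N (acc, vis) c0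
        = (((pvNbrs L N c0).foldl (pvTryAddB oS) (acc, vis)).1,
           ((pvNbrs L N c0).foldl (pvTryAddB oS) (acc, vis)).2) := rfl
    rw [hstep]
    obtain ⟨g1, g2, g3, g4, g5⟩ := ih ((pvNbrs L N c0).foldl (pvTryAddB oS) (acc, vis)).1
      ((pvNbrs L N c0).foldl (pvTryAddB oS) (acc, vis)).2 i3 i4
    refine ⟨?_, ?_, g3, g4, ?_⟩
    · intro x
      rw [g1 x, i1 x]
      constructor
      · rintro ((h | ⟨h1, h2⟩) | ⟨c, hc, h1, h2⟩)
        · exact Or.inl h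
        · exact Or.inr ⟨c0, by simp, h1, h2⟩
        · exact Or.inr ⟨c, List.mem_cons_of_mem _ hc, h1, h2⟩
      · rintro (h | ⟨c, hc, h1, h2⟩)
        · exact Or.inl (Or.inl h)
        · rcases List.mem_cons.mp hc with rfl | hc
          · exact Or.inl (Or.inr ⟨h1, h2⟩)
          · exact Or.inr ⟨c, hc, h1, h2⟩
    · intro x hx
      rcases g2 x hx with h | h
      · exact i2 x h
      · exact Or.inr (fun hv => h ((i1 x).mpr (Or.inl hv)))
    · intro x hx
      rcases g5 x hx with h | h
      · rcases i5 x h with h | h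
        · exact Or.inl h
        · exact Or.inr (pv_frontier_mono oS L N t _ x h)
      · exact Or.inr h

theorem pv_growInner_mem (oS : PySem.Set (Int × Int)) :
    ∀ (nbs : List (Int × Int)) (acc : PySem.Set (Int × Int)) (x : Int × Int),
    x ∈ nbs.foldl (fun acc nb => if PySem.Set.contains oS nb then PySem.Set.add acc nb else acc) acc
      ↔ x ∈ acc ∨ (x ∈ nbs ∧ PySem.Set.contains oS x = true) := by
  intro nbs
  induction nbs with
  | nil => intro acc x; simp
  | cons nb t ih =>
    intro acc x
    rw [List.foldl_cons]
    by_cases h : PySem.Set.contains oS nb = true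
    · rw [if_pos h, ih, PySem.Set.mem_add]
      constructor
      · rintro ((h1 | rfl) | ⟨h1, h2⟩)
        · exact Or.inl h1
        · exact Or.inr ⟨by simp, h⟩
        · exact Or.inr ⟨List.mem_cons_of_mem _ h1, h2⟩
      · rintro (h1 | ⟨h1, h2⟩)
        · exact Or.inl (Or.inl h1)
        · rcases List.mem_cons.mp h1 with rfl | h1
          · exact Or.inl (Or.inr rfl)
          · exact Or.inr ⟨h1, h2⟩
    · rw [if_neg h, ih]
      have h' : PySem.Set.contains oS nb = false := by
        cases hh : PySem.Set.contains oS nb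
        · rfl
        · exact absurd hh h
      constructor
      · rintro (h1 | ⟨h1, h2⟩)
        · exact Or.inl h1
        · exact Or.inr ⟨List.mem_cons_of_mem _ h1, h2⟩
      · rintro (h1 | ⟨h1, h2⟩)
        · exact Or.inl h1
        · rcases List.mem_cons.mp h1 with rfl | h1
          · rw [h'] at h2; exact absurd h2 (by simp)
          · exact Or.inr ⟨h1, h2⟩

theorem pv_growInner_nodup (oS : PySem.Set (Int × Int)) :
    ∀ (nbs : List (Int × Int)) (acc : PySem.Set (Int × Int)), acc.Nodup →
    (nbs.foldl (fun acc nb => if PySem.Set.contains oS nb then PySem.Set.add acc nb else acc) acc).Nodup := by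
  intro nbs
  induction nbs with
  | nil => intro acc h; exact h
  | cons nb t ih =>
    intro acc h
    rw [List.foldl_cons]
    by_cases hc : PySem.Set.contains oS nb = true
    · rw [if_pos hc]; exact ih _ (PySem.Set.nodup_add acc nb h)
    · rw [if_neg hc]; exact ih _ h

theorem pv_grow_mem (oS : PySem.Set (Int × Int)) (L : List Int) (N : Int) :
    ∀ (l : List (Int × Int)) (acc : PySem.Set (Int × Int)) (x : Int × Int),
    x ∈ l.foldl
      (fun acc c =>
        (pvNbrs L N c).foldl
          (fun acc nb => if PySem.Set.contains oS nb then PySem.Set.add acc nb else acc) acc)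
      acc
      ↔ x ∈ acc ∨ ∃ c ∈ l, x ∈ pvNbrs L N c ∧ PySem.Set.contains oS x = true := by
  intro l
  induction l with
  | nil => intro acc x; simp
  | cons c0 t ih =>
    intro acc x
    rw [List.foldl_cons, ih, pv_growInner_mem]
    constructor
    · rintro ((h | ⟨h1, h2⟩) | ⟨c, hc, h1, h2⟩)
      · exact Or.inl h
      · exact Or.inr ⟨c0, by simp, h1, h2⟩
      · exact Or.inr ⟨c, List.mem_cons_of_mem _ hc, h1, h2⟩
    · rintro (h | ⟨c, hc, h1, h2⟩)
      · exact Or.inl (Or.inl h)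
      · rcases List.mem_cons.mp hc with rfl | hc
        · exact Or.inl (Or.inr ⟨h1, h2⟩)
        · exact Or.inr ⟨c, hc, h1, h2⟩

theorem pv_grow_nodup (oS : PySem.Set (Int × Int)) (L : List Int) (N : Int) :
    ∀ (l : List (Int × Int)) (acc : PySem.Set (Int × Int)), acc.Nodup →
    (l.foldl
      (fun acc c =>
        (pvNbrs L N c).foldl
          (fun acc nb => if PySem.Set.contains oS nb then PySem.Set.add acc nb else acc) acc)
      acc).Nodup := by
  intro l
  induction l with
  | nil => intro acc h; exact h
  | cons c0 t ih =>
    intro acc h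
    rw [List.foldl_cons]
    exact ih _ (pv_growInner_nodup oS (pvNbrs L N c0) acc h)

theorem pv_nodup_subset_len {α : Type} [DecidableEq α] (l1 l2 : List α)
    (h1 : l1.Nodup) (hs : ∀ x ∈ l1, x ∈ l2) : l1.length ≤ l2.length := by
  calc l1.length = l1.toFinset.card := (List.toFinset_card_of_nodup h1).symm
    _ ≤ l2.toFinset.card := Finset.card_le_card (by
        intro x hx
        rw [List.mem_toFinset] at hx ⊢
        exact hs x hx)
    _ ≤ l2.length := List.toFinset_card_le l2

theorem pv_sat_corr (oS : PySem.Set (Int × Int)) (L : List Int) (N : Int) :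
    ∀ (fuel : Nat) (frontier : List (Int × Int)) (visited reach : PySem.Set (Int × Int)) (level : Int),
    (∀ c, c ∈ visited ↔ c ∈ reach) →
    (∀ c ∈ frontier, c ∈ visited) →
    (∀ c ∈ reach, c.1 = 0 → c ∈ frontier) →
    (∀ c ∈ visited, c ∉ frontier → ∀ nb ∈ pvNbrs L N c, PySem.Set.contains oS nb = true → nb ∈ visited) →
    visited.Nodup → reach.Nodup →
    pvLevelsB oS L N fuel frontier visited level = pvSatB oS L N fuel reach level := by
  intro fuel
  induction fuel with
  | zero => intro _ _ _ _ _ _ _ _ _ _; rfl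
  | succ fuel ih =>
    intro frontier visited reach level hvr hfv hrow hcl hndV hndR
    have hany : frontier.any (fun c => c.1 == 0) = reach.any (fun c => c.1 == 0) := by
      apply pv_bool_ext
      simp only [List.any_eq_true, beq_iff_eq]
      constructor
      · rintro ⟨c, hc, h0⟩
        exact ⟨c, (hvr c).mp (hfv c hc), h0⟩
      · rintro ⟨c, hc, h0⟩
        exact ⟨c, hrow c hc h0, h0⟩
    simp only [pvLevelsB, pvSatB]
    by_cases ha : reach.any (fun c => c.1 == 0) = true
    · rw [hany, ha, if_pos rfl, if_pos rfl]
    · have ha' : reach.any (fun c => c.1 == 0) = false := by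
        cases hb : reach.any (fun c => c.1 == 0)
        · rfl
        · exact absurd hb ha
      rw [hany, ha', if_neg Bool.false_ne_true, if_neg Bool.false_ne_true]
      have hnorow : ∀ c ∈ reach, c.1 ≠ 0 := by
        intro c hc h0
        have hb : (c.1 == 0) = true := beq_iff_eq.mpr h0
        have : reach.any (fun c => c.1 == 0) = true := List.any_eq_true.mpr ⟨c, hc, hb⟩
        rw [ha'] at this; simp at this
      obtain ⟨e1, e2, e3, e4, e5⟩ := pv_expandB_fold oS L N frontier [] visited
        (by intro c hc; cases hc) hndV
      have hgmem : ∀ x, x ∈ pvGrowB oS L N reach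
          ↔ x ∈ reach ∨ ∃ c ∈ reach, x ∈ pvNbrs L N c ∧ PySem.Set.contains oS x = true := by
        intro x; exact pv_grow_mem oS L N reach reach x
      have hgnd : (pvGrowB oS L N reach).Nodup := pv_grow_nodup oS L N reach reach hndR
      -- membership of grown equals membership of the intermediate visited'
      have hsame : ∀ x, x ∈ (frontier.foldl (pvExpandB oS L N) ([], visited)).2
          ↔ x ∈ pvGrowB oS L N reach := by
        intro x
        rw [e1 x, hgmem x]
        constructor
        · rintro (h | ⟨c, hc, h1, h2⟩)
          · exact Or.inl ((hvr x).mp h)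
          · exact Or.inr ⟨c, (hvr c).mp (hfv c hc), h1, h2⟩
        · rintro (h | ⟨c, hc, h1, h2⟩)
          · exact Or.inl ((hvr x).mpr h)
          · by_cases hcf : c ∈ frontier
            · exact Or.inr ⟨c, hcf, h1, h2⟩
            · exact Or.inl (hcl c ((hvr c).mpr hc) hcf x h1 h2)
      have hrsub : ∀ x ∈ reach, x ∈ pvGrowB oS L N reach := fun x hx => (hgmem x).mpr (Or.inl hx)
      -- emptiness of the new frontier ↔ no growth
      have hkey : (frontier.foldl (pvExpandB oS L N) ([], visited)).1 = []
          ↔ (pvGrowB oS L N reach).length = reach.length := by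
        constructor
        · intro hnil
          have hsub2 : ∀ x ∈ pvGrowB oS L N reach, x ∈ reach := by
            intro x hx
            rcases e5 x ((hsame x).mpr hx) with h | h
            · exact (hvr x).mp h
            · rw [hnil] at h; cases h
          exact Nat.le_antisymm (pv_nodup_subset_len _ _ hgnd hsub2)
            (pv_nodup_subset_len _ _ hndR hrsub)
        · intro hlen
          have hsub2 : ∀ x ∈ pvGrowB oS L N reach, x ∈ reach := by
            intro x hx
            by_contra hxn
            have hcons : (x :: reach).Nodup := List.nodup_cons.mpr ⟨hxn, hndR⟩
            have hsub3 : ∀ y ∈ x :: reach, y ∈ pvGrowB oS L N reach := by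
              intro y hy
              rcases List.mem_cons.mp hy with rfl | hy
              · exact hx
              · exact hrsub y hy
            have := pv_nodup_subset_len _ _ hcons hsub3
            simp only [List.length_cons] at this
            omega
          apply List.eq_nil_iff_forall_not_mem.mpr
          intro x hx
          have hx2 : x ∈ (frontier.foldl (pvExpandB oS L N) ([], visited)).2 := e3 x hx
          have hxr : x ∈ reach := hsub2 x ((hsame x).mp hx2)
          rcases e2 x hx with h | h
          · cases h
          · exact h ((hvr x).mpr hxr)
      cases hemp : (frontier.foldl (pvExpandB oS L N) ([], visited)).1.isEmpty
      · have hne : (frontier.foldl (pvExpandB oS L N) ([], visited)).1 ≠ [] := by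
          intro h; rw [h] at hemp; simp at hemp
        have hlen : (pvGrowB oS L N reach).length ≠ reach.length := fun h => hne (hkey.mpr h)
        have hbeq : ((pvGrowB oS L N reach).length == reach.length) = false := by
          simpa using hlen
        rw [if_neg Bool.false_ne_true, hbeq, if_neg Bool.false_ne_true]
        apply ih
        · intro c; rw [hsame c]
        · exact e3
        · -- every ring-0 cell of grown is in the new frontier
          intro c hc h0
          have hc2 : c ∈ (frontier.foldl (pvExpandB oS L N) ([], visited)).2 := (hsame c).mpr hc
          rcases e5 c hc2 with h | h
          · exact absurd h0 (hnorow c ((hvr c).mp h))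
          · exact h
        · -- closure for the next round
          intro c hc hcf nb hnb hopen
          rcases e5 c hc with h | h
          · by_cases hcfr : c ∈ frontier
            · exact (e1 nb).mpr (Or.inr ⟨c, hcfr, hnb, hopen⟩)
            · exact (e1 nb).mpr (Or.inl (hcl c h hcfr nb hnb hopen))
          · exact absurd h hcf
        · exact e4
        · exact hgnd
      · have hnil : (frontier.foldl (pvExpandB oS L N) ([], visited)).1 = [] :=
          List.isEmpty_iff.mp hemp
        have hlen : (pvGrowB oS L N reach).length = reach.length := hkey.mp hnil
        have hbeq : ((pvGrowB oS L N reach).length == reach.length) = true := by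
          simpa using hlen
        rw [if_pos rfl, hbeq, if_pos rfl]

theorem pv_ofList_isEmpty {α : Type} [BEq α] [LawfulBEq α] (l : List α) :
    (PySem.Set.ofList l).isEmpty = l.isEmpty := by
  cases l with
  | nil => rfl
  | cons a t => rw [PySem.Set.ofList_cons]; rfl

-- ===== VERDICT =====
theorem min_rooms_to_center_spec : Claim_equal_min_rooms_to_center := by
  intro lines _ hPre
  unfold Spec_min_rooms_to_center
  have hPre' : lines ≠ [] := hPre
  obtain ⟨hi1, hi2⟩ := pv_init_corr (pvOpen lines) ((lines.length : Int) - 1)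
    (PySem.List.pyRange 0 (pvGetL (pvLens lines) ((lines.length : Int) - 1)) 1) [] PySem.Dict.empty
  simp only [min_rooms_to_center, min_rooms_to_center_alt]
  rw [hi1, List.nil_append, pv_ofList_isEmpty]
  set F := ((PySem.List.pyRange 0 (pvGetL (pvLens lines) ((lines.length : Int) - 1)) 1).filter
    (fun i => PySem.Set.contains (pvOpen lines) (((lines.length : Int) - 1), i))).map
    (fun i => ((((lines.length : Int) - 1), i) : Int × Int)) with hF
  by_cases hfe : F.isEmpty = true
  · rw [if_pos hfe, if_pos hfe]
  · rw [if_neg hfe, if_neg hfe]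
    have hFnd : F.Nodup := by
      rw [hF]
      apply List.Nodup.map
      · intro a b hab; simpa using hab
      · exact List.Nodup.filter _ (PySem.List.nodup_pyRange_one _ _)
    have hget0 : ∀ c,
        ((PySem.List.pyRange 0 (pvGetL (pvLens lines) ((lines.length : Int) - 1)) 1).foldl
          (fun (st : List (Int × Int) × PySem.Dict (Int × Int) Int) i =>
            if PySem.Set.contains (pvOpen lines) (((lines.length : Int) - 1), i)
            then (st.1 ++ [(((lines.length : Int) - 1), i)], st.2.insert (((lines.length : Int) - 1), i) 1)
            else st)
          ([], PySem.Dict.empty)).2.get? c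
        = if c ∈ F then some 1 else none := by
      intro c
      rw [hi2 c, PySem.Dict.get?_empty]
    have hmain : pvStepA (pvOpen lines) (pvLens lines) (lines.length : Int)
        (2 * pvCells lines + 2) F
        ((PySem.List.pyRange 0 (pvGetL (pvLens lines) ((lines.length : Int) - 1)) 1).foldl
          (fun (st : List (Int × Int) × PySem.Dict (Int × Int) Int) i =>
            if PySem.Set.contains (pvOpen lines) (((lines.length : Int) - 1), i)
            then (st.1 ++ [(((lines.length : Int) - 1), i)], st.2.insert (((lines.length : Int) - 1), i) 1)
            else st)
          ([], PySem.Dict.empty)).2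
        = pvLevelsB (pvOpen lines) (pvLens lines) (lines.length : Int)
            (pvCells lines + 1) F (PySem.Set.ofList F) 1 := by
      apply pv_levels_corr (pvOpen lines) (pvLens lines) (lines.length : Int) (pv_open_nodup lines)
      · intro c
        apply pv_bool_ext
        rw [PySem.Dict.contains_eq_isSome_get?, hget0 c]
        constructor
        · intro hs
          by_cases hm : c ∈ F
          · exact (PySem.Set.contains_iff _ _).mpr ((PySem.Set.mem_ofList _ _).mpr hm)
          · rw [if_neg hm] at hs; simp at hs
        · intro hs
          have hm := (PySem.Set.mem_ofList _ _).mp ((PySem.Set.contains_iff _ _).mp hs)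
          rw [if_pos hm]; rfl
      · intro c hc
        rw [hget0 c, if_pos hc]
      · -- fuel bound for A: 2 * cells + 2
        have hflen : F.length ≤ (pvGetL (pvLens lines) ((lines.length : Int) - 1)).toNat := by
          rw [hF, List.length_map]
          calc ((PySem.List.pyRange 0 (pvGetL (pvLens lines) ((lines.length : Int) - 1)) 1).filter
                (fun i => PySem.Set.contains (pvOpen lines) (((lines.length : Int) - 1), i))).length
              ≤ (PySem.List.pyRange 0 (pvGetL (pvLens lines) ((lines.length : Int) - 1)) 1).length :=
                List.length_filter_le _ _
            _ = (pvGetL (pvLens lines) ((lines.length : Int) - 1) - 0).toNat :=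
                PySem.List.length_pyRange_one _ _
            _ = (pvGetL (pvLens lines) ((lines.length : Int) - 1)).toNat := by rw [Int.sub_zero]
        have h1 := pv_louter lines hPre'
        have h3 := pv_open_len lines
        refine le_trans (Nat.add_le_add hflen (pv_pvM_le _ _)) ?_
        omega
      · -- fuel bound for the level loop: cells + 1
        have h3 := pv_open_len lines
        refine le_trans (Nat.add_le_add (le_refl 1) (pv_pvM_le _ _)) ?_
        omega
    rw [hmain]
    apply pv_sat_corr
    · intro c; rfl
    · intro c hc; exact (PySem.Set.mem_ofList _ _).mpr hc
    · intro c hc _; exact (PySem.Set.mem_ofList _ _).mp hc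
    · intro c hc hcf
      exact absurd ((PySem.Set.mem_ofList _ _).mp hc) hcf
    · exact PySem.Set.nodup_ofList F
    · exact PySem.Set.nodup_ofList F
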